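-- pv_equiv track=rewrite | github.com/ji-huazhong/TransferQueue | transfer_queue/load_balance_strategy.py | dp_token_load_balancing_strategy
-- ===== SOURCE A (Python) =====
-- import heapq
-- from typing import Optional
--
-- def dp_token_load_balancing_strategy(
--     ready_for_consume_idx: list[int],
--     experience_count: int,
--     seq_len_list: list[int],
-- ) -> Optional[list[int]]:
--     """
--     get index using karmarkar_karp strategy across DP to make sure:
--         1. each DP gets the same number of seqs and close total seq_len
--         2. the standard deviation of total seq len across all DPs is small
--     need to pass seq_len_list, which is the corresponding List of seq len for ready_for_consume_idx
--     """
--     assert len(ready_for_consume_idx) == len(seq_len_list)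
--
--     if len(ready_for_consume_idx) == experience_count:
--         return [int(ready_for_consume_idx[i]) for i in range(experience_count)]
--
--     k_partitions = len(seq_len_list) // experience_count
--     sampled_indexes_idx = get_seqlen_balanced_partitions(seq_len_list, k_partitions, equal_size=True)
--     if len(sampled_indexes_idx) > 0:
--         return [int(ready_for_consume_idx[i]) for i in sampled_indexes_idx[0]]
--
--     return None
--
-- def heapq_partition(seqlen_list: list[int], k_partitions: int, equal_size: bool):
--     equal_part_num = len(seqlen_list) // k_partitions
--
--     sorted_seqlen = sorted([(seqlen, i) for i, seqlen in enumerate(seqlen_list)], reverse=True)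
--
--     # Initialize the heap: each group maintains [current sum, number of elements, group index, elements in the group]
--     groups = [[0, 0, i, []] for i in range(k_partitions)]
--     heapq.heapify(groups)
--
--     partitions = []
--     for seqlen, i in sorted_seqlen:
--         current_group = heapq.heappop(groups)
--         current_group[3].append(i)
--         current_group[0] += seqlen
--         current_group[1] += 1
--         if equal_size:
--             if current_group[1] < equal_part_num:
--                 heapq.heappush(groups, current_group)
--             else:
--                 partitions.append(current_group[3])
--         else:
--             heapq.heappush(groups, current_group)
--
--     partitions.extend([group[3] for group in groups])
--
--     if equal_size:
--         for i, partition in enumerate(partitions):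
--             if len(partition) * k_partitions != len(seqlen_list):
--                 raise ValueError(
--                     f"Partition {i} has {len(partition)} items, expected {len(seqlen_list) // k_partitions}"
--                 )
--     return partitions
--
-- def get_seqlen_balanced_partitions(seqlen_list: list[int], k_partitions: int, equal_size: bool):
--     """get order of seq lengths to make partitions balanced, this is
--         used in balancing sum of seq length across dp ranks and micro batches
--     Parameters:
--         seqlen_list (List[int]):
--             seq lengths of each items
--         k_partitions (int):
--             resulting number of partitions
--         equal_size (bool):
--             if True, number of items in each partitions must be equal.
--             if False, only consider balancing the sum, each partition can have
--             variable number of items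
--     Returns:
--         partitions (List[List[int]]):
--             return k_partitions list containing the index of items.
--     """
--     if k_partitions > len(seqlen_list):
--         raise ValueError(f"number of items:[{len(seqlen_list)}] < k_partitions:[{k_partitions}]")
--
--     def _check_and_sort_partitions(partitions):
--         seen_idx = set()
--         sorted_partitions = [None] * k_partitions
--         for i, partition in enumerate(partitions):
--             for idx in partition:
--                 seen_idx.add(idx)
--             sorted_partitions[i] = sorted(partition)
--         return sorted_partitions
--
--     partitions = heapq_partition(seqlen_list=seqlen_list, k_partitions=k_partitions, equal_size=equal_size)
--     return _check_and_sort_partitions(partitions)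
-- ===== SOURCE B (Python) =====
-- def dp_token_load_balancing_strategy(
--     ready_for_consume_idx: list[int],
--     experience_count: int,
--     seq_len_list: list[int],
-- ):
--     assert len(ready_for_consume_idx) == len(seq_len_list)
--     n = len(seq_len_list)
--     if n == experience_count:
--         return [int(x) for x in ready_for_consume_idx]
--
--     k = n // experience_count
--     equal = n // k
--     items = sorted([(seqlen, i) for i, seqlen in enumerate(seq_len_list)], reverse=True)
--     # pool of open groups: [sum, count, group_index, elements]; no heap, no full partition list:
--     # the answer is exactly the FIRST group to fill up, so return as soon as one does.
--     active = [[0, 0, j, []] for j in range(k)]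
--     for seqlen, i in items:
--         j = min(range(len(active)), key=lambda t: (active[t][0], active[t][1], active[t][2]))
--         g = active.pop(j)
--         g[3].append(i)
--         g[0] += seqlen
--         g[1] += 1
--         if g[1] == equal:
--             return [int(ready_for_consume_idx[x]) for x in sorted(g[3])]
--         active.append(g)
--     return None
-- ===== Notes on version B (the rewrite author's own statement) =====
-- stated objective: alternative
-- what changed: B drops the heap and the full k-way partition construction: it keeps a plain pool of open groups, picks the (sum,count,index)-minimal group by a linear scan, and returns as soon as the first group fills up (that first-completed group is exactly partitions[0], the only partition the entry point uses), skipping the rest of the assignment, the size-check pass and the sorting of the other partitions; it trades the heap's O(log k) pops for a simple scan.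
import Mathlib
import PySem

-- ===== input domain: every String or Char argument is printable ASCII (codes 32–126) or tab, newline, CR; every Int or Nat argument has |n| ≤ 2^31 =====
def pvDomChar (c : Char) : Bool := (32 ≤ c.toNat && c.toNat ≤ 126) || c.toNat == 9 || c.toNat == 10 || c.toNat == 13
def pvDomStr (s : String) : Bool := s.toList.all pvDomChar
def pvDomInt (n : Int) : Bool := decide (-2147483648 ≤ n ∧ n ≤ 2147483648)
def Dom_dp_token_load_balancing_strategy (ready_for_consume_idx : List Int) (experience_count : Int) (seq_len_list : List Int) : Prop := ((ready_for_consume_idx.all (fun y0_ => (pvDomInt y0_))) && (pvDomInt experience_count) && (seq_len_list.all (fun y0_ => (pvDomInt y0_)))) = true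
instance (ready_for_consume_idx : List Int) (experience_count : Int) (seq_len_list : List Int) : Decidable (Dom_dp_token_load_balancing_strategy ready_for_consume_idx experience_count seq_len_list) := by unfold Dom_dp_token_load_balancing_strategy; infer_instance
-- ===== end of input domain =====

-- B replaces A's heap-based full k-way partitioning by a plain pool of open groups with a linear
-- min-scan and returns as soon as the first group fills — the only partition the entry point uses.

-- ===== PORT A =====

-- a group is [current sum, number of elements, group index, elements]
abbrev PvGroup : Type := Int × Int × Int × List Int

-- heap order on groups: Python compares the lists lexicographically; since the group indices
-- (third component) are all distinct, the element lists are never compared — exact here.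
def pvKeyLt (a b : PvGroup) : Bool :=
  a.1 < b.1 || (a.1 == b.1 && (a.2.1 < b.2.1 || (a.2.1 == b.2.1 && a.2.2.1 < b.2.2.1)))

-- heapq.heappop: the heap is modelled as a plain list, pop extracts the (unique) minimal group;
-- with distinct keys this produces exactly the heap's pop sequence
def pvHeapPop : List PvGroup → Option (PvGroup × List PvGroup)
  | [] => none
  | g :: gs =>
    match pvHeapPop gs with
    | none => some (g, [])
    | some (m, rest) => if pvKeyLt m g then some (m, g :: rest) else some (g, gs)

-- the 'for seqlen, i in sorted_seqlen' loop of heapq_partition (heappush = append)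
def pvLoopA (equal_size : Bool) (e : Int) :
    List (Int × Int) → List PvGroup → List (List Int) → Option (List PvGroup × List (List Int))
  | [], gs, ps => some (gs, ps)
  | (s, i) :: rest, gs, ps =>
    match pvHeapPop gs with
    | none => none  -- heappop from an empty heap: IndexError
    | some (g, gs') =>
      let g' : PvGroup := (g.1 + s, g.2.1 + 1, g.2.2.1, g.2.2.2 ++ [i])
      if equal_size then
        if g'.2.1 < e then pvLoopA equal_size e rest (gs' ++ [g']) ps
        else pvLoopA equal_size e rest gs' (ps ++ [g'.2.2.2])
      else pvLoopA equal_size e rest (gs' ++ [g']) ps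

def pvHeapqPartition (seqlen_list : List Int) (k_partitions : Int) (equal_size : Bool) :
    Option (List (List Int)) :=
  match PySem.Int.floordiv? (seqlen_list.length : Int) k_partitions with
  | none => none  -- ZeroDivisionError
  | some equal_part_num =>
    let sorted_seqlen := PySem.List.sorted2
      ((PySem.List.enumerate seqlen_list).map (fun p => (p.2, p.1))) (·.1) (·.2) true
    -- heapify reorders the backing array but (keys being distinct) not the pop sequence
    let groups : List PvGroup := (PySem.List.pyRange 0 k_partitions).map (fun j => (0, 0, j, []))
    match pvLoopA equal_size equal_part_num sorted_seqlen groups [] with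
    | none => none
    | some (gs, ps) =>
      let partitions := ps ++ gs.map (fun g => g.2.2.2)
      if equal_size then
        -- the final check loop: raises ValueError at the first offending partition
        if partitions.all (fun p => (p.length : Int) * k_partitions == (seqlen_list.length : Int))
        then some partitions else none
      else some partitions

def pvGetSeqlenBalancedPartitions (seqlen_list : List Int) (k_partitions : Int) (equal_size : Bool) :
    Option (List (List Int)) :=
  if (k_partitions : Int) > (seqlen_list.length : Int) then none  -- ValueError
  else
    match pvHeapqPartition seqlen_list k_partitions equal_size with
    | none => none
    | some partitions =>
      -- _check_and_sort_partitions: the seen_idx set is built and discarded (no effect on the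
      -- result); sorted_partitions[i] = sorted(partition) for each partition, in order
      some (partitions.map (fun p => PySem.List.sorted p (fun x => x) false))

def dp_token_load_balancing_strategy (ready_for_consume_idx : List Int) (experience_count : Int) (seq_len_list : List Int) : Option (List Int) :=
  if ready_for_consume_idx.length = seq_len_list.length then
    if (ready_for_consume_idx.length : Int) = experience_count then
      (PySem.List.pyRange 0 experience_count).mapM (fun i => PySem.List.pyGet? ready_for_consume_idx i)
    else
      match PySem.Int.floordiv? (seq_len_list.length : Int) experience_count with
      | none => none  -- ZeroDivisionError
      | some k_partitions =>
        match pvGetSeqlenBalancedPartitions seq_len_list k_partitions true with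
        | none => none
        | some sampled_indexes_idx =>
          match sampled_indexes_idx with
          | [] => none  -- python: 'return None'
          | first :: _ => first.mapM (fun i => PySem.List.pyGet? ready_for_consume_idx i)
  else none  -- assert failure

-- ===== PORT B =====

-- min(range(len(active)), key=lambda t: (active[t][0], active[t][1], active[t][2])):
-- index of the first group with minimal (sum, count, index), together with that key
def pvTripLt (x y : Int × Int × Int) : Bool :=
  x.1 < y.1 || (x.1 == y.1 && (x.2.1 < y.2.1 || (x.2.1 == y.2.1 && x.2.2 < y.2.2)))

def pvArgminKey (g : PvGroup) : Int × Int × Int := (g.1, g.2.1, g.2.2.1)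

def pvArgmin : List PvGroup → Option (Nat × (Int × Int × Int))
  | [] => none  -- min() of an empty sequence: ValueError
  | g :: gs =>
    match pvArgmin gs with
    | none => some (0, pvArgminKey g)
    | some (j, bk) => if pvTripLt bk (pvArgminKey g) then some (j + 1, bk) else some (0, pvArgminKey g)

-- B's loop: pop the minimal open group, add the item; the first group to reach 'equal' items is
-- the answer — return it at once; otherwise put the group back at the end of the pool
def pvLoopB (r : List Int) (equal : Int) :
    List (Int × Int) → List PvGroup → Option (List Int)
  | [], _ => none  -- loop exhausted: python returns None
  | (s, i) :: rest, active =>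
    match pvArgmin active with
    | none => none
    | some (j, _) =>
      match PySem.List.pop? active (j : Int) with
      | none => none
      | some (g, active') =>
        let g' : PvGroup := (g.1 + s, g.2.1 + 1, g.2.2.1, g.2.2.2 ++ [i])
        if g'.2.1 = equal then
          (PySem.List.sorted g'.2.2.2 (fun x => x) false).mapM (fun x => PySem.List.pyGet? r x)
        else pvLoopB r equal rest (active' ++ [g'])

def dp_token_load_balancing_strategy_alt (ready_for_consume_idx : List Int) (experience_count : Int) (seq_len_list : List Int) : Option (List Int) :=
  if ready_for_consume_idx.length = seq_len_list.length then
    if (seq_len_list.length : Int) = experience_count then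
      some (ready_for_consume_idx.map (fun x => x))
    else
      match PySem.Int.floordiv? (seq_len_list.length : Int) experience_count with
      | none => none
      | some k =>
        match PySem.Int.floordiv? (seq_len_list.length : Int) k with
        | none => none
        | some equal =>
          let items := PySem.List.sorted2
            ((PySem.List.enumerate seq_len_list).map (fun p => (p.2, p.1))) (·.1) (·.2) true
          pvLoopB ready_for_consume_idx equal items
            ((PySem.List.pyRange 0 k).map (fun j => (0, 0, j, [])))
  else none

-- ===== PRECONDITION & SPEC =====
-- Pre_ = exactly the inputs where A returns: equal-length lists and either experience_count = n
-- (early return) or 1 ≤ experience_count < n with k = n // experience_count dividing n (otherwise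
-- the assert / ZeroDivisionError / IndexError / the final ValueError size check fires).
def Pre_dp_token_load_balancing_strategy (ready_for_consume_idx : List Int) (experience_count : Int) (seq_len_list : List Int) : Prop :=
  ready_for_consume_idx.length = seq_len_list.length ∧
  (experience_count = (seq_len_list.length : Int) ∨
    (1 ≤ experience_count ∧ experience_count < (seq_len_list.length : Int) ∧
      PySem.Int.floordiv (seq_len_list.length : Int) experience_count ∣ (seq_len_list.length : Int)))
instance (ready_for_consume_idx : List Int) (experience_count : Int) (seq_len_list : List Int) : Decidable (Pre_dp_token_load_balancing_strategy ready_for_consume_idx experience_count seq_len_list) := by unfold Pre_dp_token_load_balancing_strategy; infer_instance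

def pvWitness_dp_token_load_balancing_strategy : List Int × Int × List Int := ([10, 20, 30, 40], 2, [3, 1, 4, 1])

def Spec_dp_token_load_balancing_strategy (ready_for_consume_idx : List Int) (experience_count : Int) (seq_len_list : List Int) (out : Option (List Int)) : Prop := out = dp_token_load_balancing_strategy_alt ready_for_consume_idx experience_count seq_len_list
instance (ready_for_consume_idx : List Int) (experience_count : Int) (seq_len_list : List Int) (out : Option (List Int)) : Decidable (Spec_dp_token_load_balancing_strategy ready_for_consume_idx experience_count seq_len_list out) := by unfold Spec_dp_token_load_balancing_strategy; infer_instance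

-- ===== CLAIM (what is proved, stated in full; the proofs are below) =====
def Claim_equal_dp_token_load_balancing_strategy : Prop := ∀ (ready_for_consume_idx : List Int) (experience_count : Int) (seq_len_list : List Int), Dom_dp_token_load_balancing_strategy ready_for_consume_idx experience_count seq_len_list → Pre_dp_token_load_balancing_strategy ready_for_consume_idx experience_count seq_len_list → Spec_dp_token_load_balancing_strategy ready_for_consume_idx experience_count seq_len_list (dp_token_load_balancing_strategy ready_for_consume_idx experience_count seq_len_list)

-- ===== LEMMAS AND PROOFS =====

-- A's whole post-processing after the loop (partition collection, the ValueError size check,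
-- _check_and_sort's per-partition sort, taking partitions[0] and indexing into ready)
def pvAfterLoop (r : List Int) (k n : Int) : Option (List PvGroup × List (List Int)) → Option (List Int)
  | none => none
  | some (gs, ps) =>
    let partitions := ps ++ gs.map (fun g => g.2.2.2)
    if partitions.all (fun p => (p.length : Int) * k == n) then
      match partitions.map (fun p => PySem.List.sorted p (fun x => x) false) with
      | [] => none
      | p :: _ => p.mapM (fun i => PySem.List.pyGet? r i)
    else none

def pvSumCnt (gs : List PvGroup) : Int := (gs.map (fun g => g.2.1)).sum

lemma pvArgmin_spec : ∀ (gs : List PvGroup) (j : Nat) (bk : Int × Int × Int),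
    pvArgmin gs = some (j, bk) →
    ∃ h : j < gs.length, bk = pvArgminKey gs[j] ∧
      pvHeapPop gs = some (gs[j], gs.eraseIdx j) := by
  intro gs
  induction gs with
  | nil => intro j bk h; simp [pvArgmin] at h
  | cons g t ih =>
    intro j bk h
    rw [pvArgmin] at h
    match ht : pvArgmin t with
    | none =>
      rw [ht] at h
      have ht' : t = [] := by
        cases t with
        | nil => rfl
        | cons a b =>
          exfalso
          rw [pvArgmin] at ht
          cases h2 : pvArgmin b <;> simp [h2] at ht <;> split at ht <;> simp at ht
      subst ht'
      simp at h
      obtain ⟨h1, h2⟩ := h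
      subst h1; subst h2
      exact ⟨by simp, rfl, by simp [pvHeapPop]⟩
    | some (j', bk') =>
      rw [ht] at h
      obtain ⟨hlt, hk, hpop⟩ := ih j' bk' ht
      have hne : t ≠ [] := by intro he; subst he; simp at hlt
      by_cases hc : pvTripLt bk' (pvArgminKey g)
      · simp [hc] at h
        obtain ⟨h1, h2⟩ := h
        subst h1; subst h2
        refine ⟨by simpa using hlt, by simpa using hk, ?_⟩
        rw [pvHeapPop, hpop]
        have hkl : pvKeyLt t[j'] g = true := by
          have : pvTripLt (pvArgminKey t[j']) (pvArgminKey g) = true := hk ▸ hc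
          simpa [pvKeyLt, pvTripLt, pvArgminKey] using this
        simp [hkl]
      · simp [hc] at h
        obtain ⟨h1, h2⟩ := h
        subst h1; subst h2
        refine ⟨by simp, rfl, ?_⟩
        rw [pvHeapPop, hpop]
        have hkl : pvKeyLt t[j'] g = false := by
          have : pvTripLt (pvArgminKey t[j']) (pvArgminKey g) = false := by
            rw [← hk]; exact Bool.eq_false_iff.mpr hc
          simpa [pvKeyLt, pvTripLt, pvArgminKey] using this
        simp [hkl]

lemma pvArgmin_ne_none (gs : List PvGroup) (h : gs ≠ []) : pvArgmin gs ≠ none := by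
  cases gs with
  | nil => exact absurd rfl h
  | cons g t => rw [pvArgmin]; cases h2 : pvArgmin t <;> simp <;> split <;> simp

lemma pvHeapPop_spec (gs : List PvGroup) (h : gs ≠ []) :
    ∃ (j : Nat) (hj : j < gs.length), pvHeapPop gs = some (gs[j], gs.eraseIdx j) := by
  cases ha : pvArgmin gs with
  | none => exact absurd ha (pvArgmin_ne_none gs h)
  | some p =>
    obtain ⟨j, bk⟩ := p
    obtain ⟨hj, _, hpop⟩ := pvArgmin_spec gs j bk ha
    exact ⟨j, hj, hpop⟩

lemma pvSumCnt_eraseIdx (gs : List PvGroup) (j : Nat) (hj : j < gs.length) :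
    pvSumCnt (gs.eraseIdx j) = pvSumCnt gs - gs[j].2.1 := by
  induction gs generalizing j with
  | nil => simp at hj
  | cons g t ih =>
    cases j with
    | zero => simp [pvSumCnt]
    | succ j' =>
      simp only [List.eraseIdx_cons_succ]
      have := ih j' (by simpa using hj)
      simp [pvSumCnt] at this ⊢
      omega

lemma pvSumCnt_append_singleton (gs : List PvGroup) (g : PvGroup) :
    pvSumCnt (gs ++ [g]) = pvSumCnt gs + g.2.1 := by
  simp [pvSumCnt]

lemma pvSumCnt_le (gs : List PvGroup) (e : Int)
    (h : ∀ g ∈ gs, g.2.1 ≤ e) : pvSumCnt gs ≤ e * gs.length := by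
  have := List.sum_le_card_nsmul (gs.map (fun g => g.2.1)) e (by
    intro x hx
    obtain ⟨g, hg, rfl⟩ := List.mem_map.mp hx
    exact h g hg)
  simpa [pvSumCnt, nsmul_eq_mul, mul_comm] using this

-- phase 2: once a first partition p0 is recorded, A's loop runs to completion, every group fills
-- exactly, the size check passes, and the answer is sorted(p0) mapped through ready
lemma pvPhase2 : ∀ (rest : List (Int × Int)) (gs : List PvGroup) (ps' : List (List Int))
    (p0 : List Int) (r : List Int) (k n e : Int),
    0 < e → e * k = n →
    (∀ g ∈ gs, g.2.1 < e ∧ g.2.1 = (g.2.2.2.length : Int)) →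
    (∀ p ∈ p0 :: ps', (p.length : Int) = e) →
    (rest.length : Int) + pvSumCnt gs = e * gs.length →
    pvAfterLoop r k n (pvLoopA true e rest gs (p0 :: ps')) =
      (PySem.List.sorted p0 (fun x => x) false).mapM (fun i => PySem.List.pyGet? r i) := by
  intro rest
  induction rest with
  | nil =>
    intro gs ps' p0 r k n e he hekn hg hp hsum
    have hle : pvSumCnt gs ≤ (e - 1) * gs.length :=
      pvSumCnt_le gs (e - 1) (fun g hg' => by have := (hg g hg').1; omega)
    have hlen : gs.length = 0 := by
      by_contra hzz
      have h1 : (1 : Int) ≤ (gs.length : Int) := by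
        exact_mod_cast Nat.one_le_iff_ne_zero.mpr hzz
      simp only [List.length_nil, Nat.cast_zero, zero_add] at hsum
      nlinarith [hsum, hle, h1]
    have hnil : gs = [] := List.length_eq_zero_iff.mp hlen
    subst hnil
    rw [pvLoopA, pvAfterLoop]
    have hall : ((p0 :: ps') ++ ([] : List PvGroup).map (fun g => g.2.2.2)).all
        (fun p => (p.length : Int) * k == n) = true := by
      rw [List.all_eq_true]
      intro p hpm
      simp only [List.map_nil, List.append_nil] at hpm
      have := hp p hpm
      simp [this, hekn]
    simp only [hall, if_pos]
    simp
  | cons si rest ih =>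
    intro gs ps' p0 r k n e he hekn hg hp hsum
    obtain ⟨s, i⟩ := si
    have hne : gs ≠ [] := by
      intro hnil; subst hnil
      simp [pvSumCnt] at hsum
      omega
    obtain ⟨j, hj, hpop⟩ := pvHeapPop_spec gs hne
    rw [pvLoopA, hpop]
    simp only
    set g := gs[j] with hgdef
    have hgmem : g ∈ gs := List.getElem_mem hj
    have hcnt : g.2.1 < e := (hg g hgmem).1
    have hlenel : g.2.1 = (g.2.2.2.length : Int) := (hg g hgmem).2
    have herase : ∀ x ∈ gs.eraseIdx j, x.2.1 < e ∧ x.2.1 = (x.2.2.2.length : Int) :=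
      fun x hx => hg x (List.mem_of_mem_eraseIdx hx)
    have hsumerase : pvSumCnt (gs.eraseIdx j) = pvSumCnt gs - g.2.1 := pvSumCnt_eraseIdx gs j hj
    have hlenerase : (gs.eraseIdx j).length = gs.length - 1 := by
      rw [List.length_eraseIdx]; simp [hj]
    by_cases hlt : g.2.1 + 1 < e
    · simp only [if_true]
      rw [if_pos hlt]
      apply ih _ ps' p0 r k n e he hekn
      · intro x hx
        rcases List.mem_append.mp hx with hx1 | hx2
        · exact herase x hx1
        · simp at hx2; subst hx2
          refine ⟨hlt, ?_⟩
          push_cast [List.length_append, List.length_singleton]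
          omega
      · exact hp
      · have h1 : 1 ≤ gs.length := by
          cases gs with
          | nil => exact absurd rfl hne
          | cons a b => simp
        rw [pvSumCnt_append_singleton, hsumerase]
        simp only [List.length_append, List.length_singleton, hlenerase]
        have hL : ((gs.length - 1 + 1 : Nat) : Int) = (gs.length : Int) := by omega
        rw [hL]
        simp only [List.length_cons] at hsum
        push_cast at hsum
        omega
    · have hceq : g.2.1 + 1 = e := by omega
      simp only [if_true]
      rw [if_neg hlt]
      have hps : (p0 :: ps') ++ [g.2.2.2 ++ [i]] = p0 :: (ps' ++ [g.2.2.2 ++ [i]]) := by simp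
      rw [hps]
      apply ih _ _ p0 r k n e he hekn herase
      · intro p hpm
        rcases List.mem_cons.mp hpm with h1 | h2
        · exact hp p (h1 ▸ List.mem_cons_self)
        · rcases List.mem_append.mp h2 with h3 | h4
          · exact hp p (List.mem_cons_of_mem _ h3)
          · simp at h4; subst h4
            push_cast [List.length_append, List.length_singleton]
            omega
      · have h1 : 1 ≤ gs.length := by
          cases gs with
          | nil => exact absurd rfl hne
          | cons a b => simp
        rw [hsumerase, hlenerase]
        have hL : ((gs.length - 1 : Nat) : Int) = (gs.length : Int) - 1 := by omega
        rw [hL]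
        have hmul : e * ((gs.length : Int) - 1) = e * (gs.length : Int) - e := by ring
        rw [hmul]
        simp only [List.length_cons] at hsum
        push_cast at hsum
        omega

-- phase 1: before any partition completes, A's (loop + post-processing) equals B's loop
lemma pvPhase1 : ∀ (rest : List (Int × Int)) (gs : List PvGroup) (r : List Int) (k n e : Int),
    0 < e → e * k = n → gs ≠ [] →
    (∀ g ∈ gs, g.2.1 < e ∧ g.2.1 = (g.2.2.2.length : Int)) →
    (rest.length : Int) + pvSumCnt gs = e * gs.length →
    pvAfterLoop r k n (pvLoopA true e rest gs []) = pvLoopB r e rest gs := by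
  intro rest
  induction rest with
  | nil =>
    intro gs r k n e he hekn hne hg hsum
    exfalso
    have hle : pvSumCnt gs ≤ (e - 1) * gs.length :=
      pvSumCnt_le gs (e - 1) (fun g hg' => by have := (hg g hg').1; omega)
    have h1 : 1 ≤ gs.length := by
      cases gs with
      | nil => exact absurd rfl hne
      | cons a b => simp
    have h2 : (gs.length : Int) ≥ 1 := by exact_mod_cast h1
    have hexp : (e - 1) * (gs.length : Int) = e * (gs.length : Int) - (gs.length : Int) := by ring
    rw [hexp] at hle
    simp only [List.length_nil, Nat.cast_zero, zero_add] at hsum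
    omega
  | cons si rest ih =>
    intro gs r k n e he hekn hne hg hsum
    obtain ⟨s, i⟩ := si
    cases ha : pvArgmin gs with
    | none => exact absurd ha (pvArgmin_ne_none gs hne)
    | some p =>
      obtain ⟨j, bk⟩ := p
      obtain ⟨hj, hbk, hpop⟩ := pvArgmin_spec gs j bk ha
      rw [pvLoopA, hpop, pvLoopB, ha]
      dsimp only
      rw [PySem.List.pop?_natCast gs j hj]
      dsimp only
      set g := gs[j] with hgdef
      have hgmem : g ∈ gs := List.getElem_mem hj
      have hcnt : g.2.1 < e := (hg g hgmem).1
      have hlenel : g.2.1 = (g.2.2.2.length : Int) := (hg g hgmem).2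
      have herase : ∀ x ∈ gs.eraseIdx j, x.2.1 < e ∧ x.2.1 = (x.2.2.2.length : Int) :=
        fun x hx => hg x (List.mem_of_mem_eraseIdx hx)
      have hsumerase : pvSumCnt (gs.eraseIdx j) = pvSumCnt gs - g.2.1 := pvSumCnt_eraseIdx gs j hj
      have hlenerase : (gs.eraseIdx j).length = gs.length - 1 := by
        rw [List.length_eraseIdx]; simp [hj]
      have h1 : 1 ≤ gs.length := by
        cases gs with
        | nil => exact absurd rfl hne
        | cons a b => simp
      by_cases hlt : g.2.1 + 1 < e
      · have hneq : ¬ (g.2.1 + 1 = e) := by omega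
        simp only [if_true]
        rw [if_pos hlt, if_neg hneq]
        apply ih _ r k n e he hekn
        · simp
        · intro x hx
          rcases List.mem_append.mp hx with hx1 | hx2
          · exact herase x hx1
          · simp at hx2; subst hx2
            refine ⟨hlt, ?_⟩
            push_cast [List.length_append, List.length_singleton]
            omega
        · rw [pvSumCnt_append_singleton, hsumerase]
          simp only [List.length_append, List.length_singleton, hlenerase]
          have hL : ((gs.length - 1 + 1 : Nat) : Int) = (gs.length : Int) := by omega
          rw [hL]
          simp only [List.length_cons] at hsum
          push_cast at hsum
          omega
      · have hceq : g.2.1 + 1 = e := by omega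
        simp only [if_true]
        rw [if_neg hlt, if_pos hceq]
        have : ([] : List (List Int)) ++ [g.2.2.2 ++ [i]] = (g.2.2.2 ++ [i]) :: [] := by simp
        rw [this]
        rw [pvPhase2 rest (gs.eraseIdx j) [] (g.2.2.2 ++ [i]) r k n e he hekn herase]
        · intro p hpm
          simp at hpm; subst hpm
          push_cast [List.length_append, List.length_singleton]
          omega
        · rw [hsumerase, hlenerase]
          have hL : ((gs.length - 1 : Nat) : Int) = (gs.length : Int) - 1 := by omega
          rw [hL]
          have hmul : e * ((gs.length : Int) - 1) = e * (gs.length : Int) - e := by ring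
          rw [hmul]
          simp only [List.length_cons] at hsum
          push_cast at hsum
          omega

lemma pvMapMAux : ∀ (t pre : List Int),
    (List.range' pre.length t.length).mapM (fun k => (pre ++ t)[k]?) = some t := by
  intro t
  induction t with
  | nil => intro pre; simp
  | cons x xs ih =>
    intro pre
    simp only [List.length_cons]
    rw [List.range'_succ, List.mapM_cons]
    have h2 : (List.range' (pre.length + 1) xs.length).mapM (fun k => (pre ++ x :: xs)[k]?) =
        some xs := by
      have := ih (pre ++ [x])
      simpa using this
    simp [h2]

lemma pvRangeMapM (r : List Int) :
    (PySem.List.pyRange 0 (r.length : Int)).mapM (fun i => PySem.List.pyGet? r i) = some r := by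
  rw [PySem.List.pyRange_zero_natCast]
  rw [List.mapM_map]
  have : ∀ k : Nat, PySem.List.pyGet? r ((k : Nat) : Int) = r[k]? := fun k =>
    PySem.List.pyGet?_natCast r k
  calc (List.range r.length).mapM (fun k => PySem.List.pyGet? r ((k : Nat) : Int))
      = (List.range r.length).mapM (fun k => r[k]?) := by
        congr 1; funext k; exact this k
    _ = some r := by
        have := pvMapMAux r []
        simpa [List.range_eq_range'] using this

-- ===== VERDICT (by name: the statement is the Claim_ definition above) =====
theorem dp_token_load_balancing_strategy_spec : Claim_equal_dp_token_load_balancing_strategy := by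
  intro r ec s _ hpre
  obtain ⟨hlen, hcase⟩ := hpre
  unfold Spec_dp_token_load_balancing_strategy
  unfold dp_token_load_balancing_strategy dp_token_load_balancing_strategy_alt
  rw [if_pos hlen, if_pos hlen]
  rcases hcase with hec | ⟨hec1, hecn, hdvd⟩
  · -- experience_count = len: both early-return the whole list
    have hA : ((r.length : Int) = ec) := by rw [hlen]; omega
    have hB : ((s.length : Int) = ec) := by omega
    rw [if_pos hA, if_pos hB]
    rw [← hA, pvRangeMapM]
    simp
  · -- 1 ≤ experience_count < len with k ∣ len
    have hn0 : (0 : Int) < (s.length : Int) := by omega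
    have hA : ¬ ((r.length : Int) = ec) := by rw [hlen]; omega
    have hB : ¬ ((s.length : Int) = ec) := by omega
    rw [if_neg hA, if_neg hB]
    have hecne : ec ≠ 0 := by omega
    have hfd : PySem.Int.floordiv? (s.length : Int) ec =
        some (PySem.Int.floordiv (s.length : Int) ec) := by
      simp [PySem.Int.floordiv?, PySem.Int.floordiv, hecne]
    rw [hfd]
    dsimp only
    set k := PySem.Int.floordiv (s.length : Int) ec with hkdef
    have hk1 : 1 ≤ k := by
      rw [hkdef]
      rw [PySem.Int.le_floordiv_iff_mul_le (by omega)]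
      omega
    have hkn : k ≤ (s.length : Int) := by
      rw [hkdef]
      have := (PySem.Int.floordiv_lt_iff_lt_mul (a := (s.length : Int))
        (b := ec) (q := (s.length : Int) + 1) (by omega)).mpr (by nlinarith)
      omega
    have hkne : k ≠ 0 := by omega
    have hfe : PySem.Int.floordiv? (s.length : Int) k =
        some (PySem.Int.floordiv (s.length : Int) k) := by
      simp [PySem.Int.floordiv?, PySem.Int.floordiv, hkne]
    set e := PySem.Int.floordiv (s.length : Int) k with hedef
    have hekn : e * k = (s.length : Int) := by
      have hmod : PySem.Int.mod (s.length : Int) k = 0 :=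
        (PySem.Int.mod_eq_zero_iff_dvd _ _).mpr hdvd
      have hfm := PySem.Int.floordiv_mul_add_mod (s.length : Int) k
      rw [hmod] at hfm
      rw [hedef]
      omega
    have he1 : 1 ≤ e := by
      rw [hedef, PySem.Int.le_floordiv_iff_mul_le (by omega)]
      omega
    -- reduce B's glue to pvLoopB, A's glue to pvAfterLoop of its loop
    rw [hfe]
    dsimp only
    unfold pvGetSeqlenBalancedPartitions
    rw [if_neg (by omega : ¬ (k > (s.length : Int)))]
    unfold pvHeapqPartition
    rw [hfe]
    dsimp only
    set items := PySem.List.sorted2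
      ((PySem.List.enumerate s).map (fun p => (p.2, p.1))) (·.1) (·.2) true with hitems
    set gs0 : List PvGroup := (PySem.List.pyRange 0 k).map (fun j => (0, 0, j, [])) with hgs0
    have hlgs0 : gs0.length = k.toNat := by
      rw [hgs0]
      simp [PySem.List.length_pyRange_one]
    have hlgs0' : (gs0.length : Int) = k := by
      rw [hlgs0]; omega
    have hgs0ne : gs0 ≠ [] := by
      intro hnil
      rw [hnil] at hlgs0'
      simp at hlgs0'
      omega
    have hitemslen : (items.length : Int) = (s.length : Int) := by
      rw [hitems]
      have := (PySem.List.sorted2_perm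
        ((PySem.List.enumerate s).map (fun p => (p.2, p.1))) (·.1) (·.2) true).length_eq
      rw [this]
      simp [PySem.List.length_enumerate]
    have hsum0 : pvSumCnt gs0 = 0 := by
      rw [hgs0]
      simp [pvSumCnt, List.map_map, Function.comp_def, List.map_const', List.sum_replicate]
    have hmain := pvPhase1 items gs0 r k (s.length : Int) e (by omega) hekn hgs0ne
      (by
        intro g hgm
        rw [hgs0] at hgm
        obtain ⟨j, _, rfl⟩ := List.mem_map.mp hgm
        constructor
        · simpa using he1
        · simp)
      (by rw [hsum0, hitemslen, hlgs0']; omega)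
    rw [← hmain]
    unfold pvAfterLoop
    cases hres : pvLoopA true e items gs0 [] with
    | none => rfl
    | some pr =>
      obtain ⟨gs, ps⟩ := pr
      dsimp only
      by_cases hall : ((ps ++ gs.map (fun g => g.2.2.2)).all
          (fun p => (p.length : Int) * k == (s.length : Int))) = true
      · rw [if_pos hall, if_pos hall]
        cases hparts : ps ++ gs.map (fun g => g.2.2.2) with
        | nil => simp
        | cons p0 pt => simp
      · rw [if_neg hall, if_neg hall]
        rfl
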